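-- pv_equiv track=rewrite | github.com/Dend0x/MUNI_FI | ib111/02/02/p2_joined.py | joined
-- ===== SOURCE A (Python) =====
-- def two_to_ten(number):
--     result = 0
--     i = 0
--
--     while number > 0:
--         result += (number % 10) * 2 ** i
--         number //= 10
--         i += 1
--
--     return result
--
-- def joined(start, count):
--     bi_number = 0
--
--     for i in range(start, start + count):
--         number = i
--         current_number_bi = 0
--         digit = 0
--
--         while number > 0:
--             current_number_bi += (number % 2) * 10 ** digit
--             number //= 2
--             digit += 1
--         bi_number = bi_number * 10 ** digit + current_number_bi
--
--     return two_to_ten(bi_number)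
-- ===== SOURCE B (Python) =====
-- def joined(start, count):
--     acc = 0
--     for i in range(start, start + count):
--         if i > 0:
--             acc = (acc << i.bit_length()) + i
--     return acc
-- ===== Notes on version B (the rewrite author's own statement) =====
-- stated objective: faster
-- what changed: B replaces A's double base conversion (building the concatenated binary digits as a decimal number with 10**digit arithmetic, then re-reading that decimal number as binary) with a single pass that shift-adds each positive i's bits directly into the binary accumulator via i.bit_length().
import Mathlib
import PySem

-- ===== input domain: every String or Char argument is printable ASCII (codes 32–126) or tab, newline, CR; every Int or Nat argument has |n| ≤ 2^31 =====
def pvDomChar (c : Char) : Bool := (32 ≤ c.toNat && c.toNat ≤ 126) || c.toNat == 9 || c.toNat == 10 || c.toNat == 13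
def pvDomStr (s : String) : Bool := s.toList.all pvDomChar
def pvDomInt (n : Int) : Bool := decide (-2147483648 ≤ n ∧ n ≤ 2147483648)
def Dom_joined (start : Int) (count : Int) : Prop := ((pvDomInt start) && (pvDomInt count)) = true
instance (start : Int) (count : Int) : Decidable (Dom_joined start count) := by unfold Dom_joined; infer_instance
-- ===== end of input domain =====

-- ===== PORT A =====
-- One honest line: B drops A's decimal-encoding detour and shift-adds each positive i's bits
-- directly into the accumulator (a different, measurably faster algorithm; same return value).

-- while number > 0: result += (number % 10) * 2 ** i; number //= 10; i += 1   (loop of two_to_ten)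
def twoToTenLoop (number : Int) (result : Int) (i : Nat) : Int :=
  if h : 0 < number then
    twoToTenLoop (PySem.Int.floordiv number 10) (result + PySem.Int.mod number 10 * 2 ^ i) (i + 1)
  else result
termination_by number.toNat
decreasing_by
  rw [PySem.Int.floordiv_eq_ediv_of_pos (by omega : (0:Int) < 10)]; omega

def two_to_ten (number : Int) : Int := twoToTenLoop number 0 0

-- while number > 0: current += (number % 2) * 10 ** digit; number //= 2; digit += 1   (inner loop of joined)
def joinedInner (number : Int) (current : Int) (digit : Nat) : Int × Nat :=
  if h : 0 < number then
    joinedInner (PySem.Int.floordiv number 2) (current + PySem.Int.mod number 2 * 10 ^ digit) (digit + 1)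
  else (current, digit)
termination_by number.toNat
decreasing_by
  rw [PySem.Int.floordiv_eq_ediv_of_pos (by omega : (0:Int) < 2)]; omega

def joined (start : Int) (count : Int) : Int :=
  two_to_ten ((PySem.List.pyRange start (start + count) 1).foldl
    (fun bi_number i =>
      let p := joinedInner i 0 0
      bi_number * 10 ^ p.2 + p.1) 0)

-- ===== PORT B =====
-- for i in range(start, start+count): if i > 0: acc = (acc << i.bit_length()) + i
def joined_alt (start : Int) (count : Int) : Int :=
  (PySem.List.pyRange start (start + count) 1).foldl
    (fun acc i => if 0 < i then (acc <<< PySem.Int.bitLength i) + i else acc) 0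

-- ===== PRECONDITION & SPEC =====
def Spec_joined (start : Int) (count : Int) (out : Int) : Prop := out = joined_alt start count
instance (start : Int) (count : Int) (out : Int) : Decidable (Spec_joined start count out) := by unfold Spec_joined; infer_instance

-- ===== CLAIM (what is proved, stated in full; the proofs are below) =====
def Claim_equal_joined : Prop := ∀ (start : Int) (count : Int), Dom_joined start count → Spec_joined start count (joined start count)

-- ===== LEMMAS AND PROOFS =====

-- Tm n : read the decimal digits of n as binary digits (the value two_to_ten computes).
def Tm (n : Int) : Int :=
  if h : 0 < n then PySem.Int.mod n 10 + 2 * Tm (PySem.Int.floordiv n 10) else 0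
termination_by n.toNat
decreasing_by
  rw [PySem.Int.floordiv_eq_ediv_of_pos (by omega : (0:Int) < 10)]; omega

-- Dm n / Lm n : the decimal encoding of n's binary digits and its digit count
-- (the values joinedInner accumulates).
def Dm (n : Int) : Int :=
  if h : 0 < n then PySem.Int.mod n 2 + 10 * Dm (PySem.Int.floordiv n 2) else 0
termination_by n.toNat
decreasing_by
  rw [PySem.Int.floordiv_eq_ediv_of_pos (by omega : (0:Int) < 2)]; omega

def Lm (n : Int) : Nat :=
  if h : 0 < n then Lm (PySem.Int.floordiv n 2) + 1 else 0
termination_by n.toNat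
decreasing_by
  rw [PySem.Int.floordiv_eq_ediv_of_pos (by omega : (0:Int) < 2)]; omega

theorem Tm_pos (n : Int) (h : 0 < n) :
    Tm n = PySem.Int.mod n 10 + 2 * Tm (PySem.Int.floordiv n 10) := by rw [Tm, dif_pos h]

theorem Tm_nonpos (n : Int) (h : ¬ 0 < n) : Tm n = 0 := by rw [Tm, dif_neg h]

theorem Dm_pos (n : Int) (h : 0 < n) :
    Dm n = PySem.Int.mod n 2 + 10 * Dm (PySem.Int.floordiv n 2) := by rw [Dm, dif_pos h]

theorem Dm_nonpos (n : Int) (h : ¬ 0 < n) : Dm n = 0 := by rw [Dm, dif_neg h]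

theorem Lm_pos (n : Int) (h : 0 < n) : Lm n = Lm (PySem.Int.floordiv n 2) + 1 := by
  rw [Lm, dif_pos h]

theorem Lm_nonpos (n : Int) (h : ¬ 0 < n) : Lm n = 0 := by rw [Lm, dif_neg h]

theorem twoToTenLoop_eq (n r : Int) (i : Nat) : twoToTenLoop n r i = r + Tm n * 2 ^ i := by
  fun_induction twoToTenLoop n r i with
  | case1 n r i h ih =>
    rw [ih, Tm_pos n h]; ring
  | case2 n r i h =>
    rw [Tm_nonpos n h]; ring

theorem joinedInner_eq (n c : Int) (d : Nat) : joinedInner n c d = (c + Dm n * 10 ^ d, d + Lm n) := by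
  fun_induction joinedInner n c d with
  | case1 n c d h ih =>
    rw [ih, Dm_pos n h, Lm_pos n h]
    refine Prod.ext ?_ ?_
    · show _ = c + (_ + 10 * Dm _) * 10 ^ d
      push_cast; ring
    · show d + 1 + Lm _ = d + (Lm _ + 1); omega
  | case2 n c d h =>
    rw [Dm_nonpos n h, Lm_nonpos n h]
    simp

theorem Dm_nonneg (n : Int) : 0 ≤ Dm n := by
  fun_induction Dm n with
  | case1 n h ih =>
    have := PySem.Int.mod_nonneg n (by omega : (0:Int) < 2)
    omega
  | case2 n h => exact le_refl 0

theorem Lm_eq_bitLength (n : Int) (h : 0 < n) : Lm n = PySem.Int.bitLength n := by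
  fun_induction Lm n with
  | case1 n h ih =>
    rw [PySem.Int.bitLength_of_pos h]
    by_cases h2 : 0 < PySem.Int.floordiv n 2
    · rw [ih h2]
    · have hz : PySem.Int.floordiv n 2 = 0 := by
        rw [PySem.Int.floordiv_eq_ediv_of_pos (by omega : (0:Int) < 2)] at h2 ⊢; omega
      rw [hz]; rw [Lm]; simp [PySem.Int.bitLength_zero]
  | case2 n hn => exact absurd h hn

theorem Tm_step (x r : Int) (hx : 0 ≤ x) (hr : 0 ≤ r ∧ r < 10) : Tm (x * 10 + r) = r + 2 * Tm x := by
  by_cases h : 0 < x * 10 + r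
  · rw [Tm_pos _ h, PySem.Int.mod_eq_emod_of_pos (by omega : (0:Int) < 10),
      PySem.Int.floordiv_eq_ediv_of_pos (by omega : (0:Int) < 10)]
    have h1 : (x * 10 + r) % 10 = r := by omega
    have h2 : (x * 10 + r) / 10 = x := by omega
    rw [h1, h2]
  · have hx0 : x = 0 ∧ r = 0 := by constructor <;> nlinarith
    rw [Tm_nonpos _ h, Tm_nonpos x (by omega), hx0.2]; ring

theorem key (k : Nat) : ∀ n : Int, n.toNat ≤ k → 0 ≤ n → ∀ b : Int, 0 ≤ b →
    Tm (b * 10 ^ Lm n + Dm n) = Tm b * 2 ^ Lm n + n := by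
  induction k with
  | zero =>
    intro n hk hn b hb
    have hz : n = 0 := by omega
    subst hz
    rw [Lm_nonpos 0 (by omega), Dm_nonpos 0 (by omega)]
    simp
  | succ k ih =>
    intro n hk hn b hb
    by_cases h : 0 < n
    · rw [Lm_pos n h, Dm_pos n h]
      have hediv : PySem.Int.floordiv n 2 = n / 2 :=
        PySem.Int.floordiv_eq_ediv_of_pos (by omega : (0:Int) < 2)
      set m := PySem.Int.floordiv n 2 with hm
      have hm0 : 0 ≤ m := by omega
      have hmk : m.toNat ≤ k := by omega
      have hb' : 0 ≤ b * 10 ^ Lm m + Dm m :=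
        add_nonneg (mul_nonneg hb (by positivity)) (Dm_nonneg m)
      have hmodb : 0 ≤ PySem.Int.mod n 2 ∧ PySem.Int.mod n 2 < 2 :=
        ⟨PySem.Int.mod_nonneg n (by omega), PySem.Int.mod_lt n (by omega)⟩
      have hf : m * 2 + PySem.Int.mod n 2 = n := PySem.Int.floordiv_mul_add_mod n 2
      have hmr : PySem.Int.mod n 2 = n - 2 * m := by omega
      calc Tm (b * 10 ^ (Lm m + 1) + (PySem.Int.mod n 2 + 10 * Dm m))
          = Tm ((b * 10 ^ Lm m + Dm m) * 10 + PySem.Int.mod n 2) := by congr 1; ring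
        _ = PySem.Int.mod n 2 + 2 * Tm (b * 10 ^ Lm m + Dm m) :=
            Tm_step _ _ hb' ⟨hmodb.1, by omega⟩
        _ = PySem.Int.mod n 2 + 2 * (Tm b * 2 ^ Lm m + m) := by rw [ih m hmk hm0 b hb]
        _ = Tm b * 2 ^ (Lm m + 1) + n := by rw [hmr]; ring
    · have hz : n = 0 := by omega
      subst hz
      rw [Lm_nonpos 0 (by omega), Dm_nonpos 0 (by omega)]
      simp

theorem fold_inv (l : List Int) : ∀ bi acc : Int, 0 ≤ bi → Tm bi = acc →
    0 ≤ l.foldl (fun bi_number i => let p := joinedInner i 0 0; bi_number * 10 ^ p.2 + p.1) bi ∧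
    Tm (l.foldl (fun bi_number i => let p := joinedInner i 0 0; bi_number * 10 ^ p.2 + p.1) bi) =
      l.foldl (fun (acc : Int) (i : Int) => if 0 < i then (acc <<< PySem.Int.bitLength i) + i else acc) acc := by
  induction l with
  | nil => intro bi acc h1 h2; exact ⟨h1, h2⟩
  | cons i l ih =>
    intro bi acc h1 h2
    simp only [List.foldl_cons, joinedInner_eq i 0 0]
    by_cases hi : 0 < i
    · rw [if_pos hi]
      apply ih
      · simp only [pow_zero, mul_one, zero_add]
        exact add_nonneg (mul_nonneg h1 (by positivity)) (Dm_nonneg i)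
      · simp only [pow_zero, mul_one, zero_add]
        rw [key i.toNat i le_rfl (le_of_lt hi) bi h1, h2, Int.shiftLeft_eq,
          Lm_eq_bitLength i hi]
    · rw [if_neg hi]
      apply ih
      · simp only [Dm_nonpos i hi, Lm_nonpos i hi, pow_zero, mul_one, add_zero]
        exact h1
      · simp only [Dm_nonpos i hi, Lm_nonpos i hi, pow_zero, mul_one, add_zero]
        exact h2

-- ===== VERDICT (by name: the statement is the Claim_ definition above) =====
theorem joined_spec : Claim_equal_joined := by
  intro start count _
  unfold Spec_joined joined joined_alt two_to_ten
  rw [twoToTenLoop_eq]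
  have h := fold_inv (PySem.List.pyRange start (start + count) 1) 0 0 le_rfl (by rw [Tm]; simp)
  simpa using h.2
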